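-- pv_equiv track=rewrite | github.com/linlance07/Leet_Codes | Find Maximum Equal sum of Three Stacks - GFG/find-maximum-equal-sum-of-three-stacks.py | maxEqualSum
-- ===== SOURCE A (Python) =====
-- from typing import List
--
-- def maxEqualSum(N1:int,N2:int,N3:int, S1 : List[int], S2 : List[int], S3 : List[int]) -> int:
--     asum = sum(S1)
--     a = {asum}
--     for i in S1:
--         asum -= i
--         a.add(asum)
--     bsum = sum(S2)
--     b = {bsum}
--     for i in S2:
--         bsum -= i
--         b.add(bsum)
--     csum = sum(S3)
--     c = {csum}
--     for i in S3:
--         csum -= i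
--         c.add(csum)
--     d = sorted(a.intersection(b,c),reverse=True)
--     return d[0] if d else 0
-- ===== SOURCE B (Python) =====
-- def maxEqualSum(N1, N2, N3, S1, S2, S3):
--     def sums_desc(S):
--         out = [0]
--         t = 0
--         for x in reversed(S):
--             t += x
--             out.append(t)
--         out.sort(reverse=True)
--         return out
--
--     A, B, C = sums_desc(S1), sums_desc(S2), sums_desc(S3)
--     i = j = k = 0
--     while i < len(A) and j < len(B) and k < len(C):
--         a, b, c = A[i], B[j], C[k]
--         if a == b == c:
--             return a
--         m = max(a, b, c)
--         if a == m:
--             i += 1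
--         if b == m:
--             j += 1
--         if c == m:
--             k += 1
--     return 0
-- ===== Notes on version B (the rewrite author's own statement) =====
-- stated objective: alternative
-- what changed: B replaces A's hash-set intersection of the three running-sum sets (plus a final descending sort) by building one descending-sorted suffix-sum array per stack and running a three-pointer merge that advances past the current maximum until all three heads coincide.
import Mathlib
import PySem

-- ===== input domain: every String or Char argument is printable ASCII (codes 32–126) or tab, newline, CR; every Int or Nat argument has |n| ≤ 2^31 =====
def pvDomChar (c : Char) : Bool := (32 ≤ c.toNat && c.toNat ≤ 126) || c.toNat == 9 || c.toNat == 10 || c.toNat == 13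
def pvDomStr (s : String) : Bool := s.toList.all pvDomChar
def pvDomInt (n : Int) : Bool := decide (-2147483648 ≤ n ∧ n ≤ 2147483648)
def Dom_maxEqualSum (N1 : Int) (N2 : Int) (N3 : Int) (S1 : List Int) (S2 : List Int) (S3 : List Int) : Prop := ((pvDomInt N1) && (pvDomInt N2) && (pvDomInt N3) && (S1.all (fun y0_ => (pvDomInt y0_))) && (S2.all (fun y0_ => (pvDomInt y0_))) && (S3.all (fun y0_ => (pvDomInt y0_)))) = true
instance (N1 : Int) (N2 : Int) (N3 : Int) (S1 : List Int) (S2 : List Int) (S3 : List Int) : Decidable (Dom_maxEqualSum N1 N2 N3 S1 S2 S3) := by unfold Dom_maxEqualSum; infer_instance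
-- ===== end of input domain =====

-- B replaces A's three hash sets of running sums + set intersection + descending sort by a
-- descending-sorted suffix-sum array per stack and a three-pointer merge that advances past
-- the current maximum until the three heads coincide (objective: alternative).

-- ===== PORT A =====
-- 'asum = sum(S); a = {asum}; for i in S: asum -= i; a.add(asum)'
def pvShrink (S : List Int) : Int × PySem.Set Int :=
  S.foldl (fun p i => (p.1 - i, PySem.Set.add p.2 (p.1 - i)))
    (S.sum, PySem.Set.add PySem.Set.empty S.sum)

def maxEqualSum (N1 : Int) (N2 : Int) (N3 : Int) (S1 : List Int) (S2 : List Int) (S3 : List Int) : Int :=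
  let a := (pvShrink S1).2
  let b := (pvShrink S2).2
  let c := (pvShrink S3).2
  let d := PySem.List.sorted (PySem.Set.inter (PySem.Set.inter a b) c) (fun x => x) true
  match d with
  | [] => 0
  | x :: _ => x

-- ===== PORT B =====
-- 'out = [0]; t = 0; for x in reversed(S): t += x; out.append(t); out.sort(reverse=True)'
def pvSumsDesc (S : List Int) : List Int :=
  PySem.List.sorted
    ((S.reverse.foldl (fun p x => (p.1 + x, p.2 ++ [p.1 + x])) (0, [0])).2)
    (fun x => x) true

-- the three-pointer merge loop of B ('while i < len(A) and …'); fuel = total length bounds the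
-- iterations (each step drops at least one head), the 0/[] fallthroughs are the loop exiting
-- without a match (Python's 'return 0')
def pvMerge3Go : Nat → List Int → List Int → List Int → Int
  | 0, _, _, _ => 0
  | f + 1, a :: as, b :: bs, c :: cs =>
    if a = b ∧ b = c then a
    else
      pvMerge3Go f (if a = max a (max b c) then as else a :: as)
                 (if b = max a (max b c) then bs else b :: bs)
                 (if c = max a (max b c) then cs else c :: cs)
  | _ + 1, _, _, _ => 0

def pvMerge3 (A B C : List Int) : Int :=
  pvMerge3Go (A.length + B.length + C.length + 1) A B C

def maxEqualSum_alt (N1 : Int) (N2 : Int) (N3 : Int) (S1 : List Int) (S2 : List Int) (S3 : List Int) : Int :=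
  pvMerge3 (pvSumsDesc S1) (pvSumsDesc S2) (pvSumsDesc S3)

-- ===== PRECONDITION & SPEC =====
def Spec_maxEqualSum (N1 : Int) (N2 : Int) (N3 : Int) (S1 : List Int) (S2 : List Int) (S3 : List Int) (out : Int) : Prop := out = maxEqualSum_alt N1 N2 N3 S1 S2 S3
instance (N1 : Int) (N2 : Int) (N3 : Int) (S1 : List Int) (S2 : List Int) (S3 : List Int) (out : Int) : Decidable (Spec_maxEqualSum N1 N2 N3 S1 S2 S3 out) := by unfold Spec_maxEqualSum; infer_instance

-- ===== CLAIM (what is proved, stated in full; the proofs are below) =====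
def Claim_equal_maxEqualSum : Prop := ∀ (N1 : Int) (N2 : Int) (N3 : Int) (S1 : List Int) (S2 : List Int) (S3 : List Int), Dom_maxEqualSum N1 N2 N3 S1 S2 S3 → Spec_maxEqualSum N1 N2 N3 S1 S2 S3 (maxEqualSum N1 N2 N3 S1 S2 S3)

-- ===== LEMMAS AND PROOFS =====

-- x is a suffix sum of S (including sum S at i = 0 and 0 at i = S.length)
def SufMem (S : List Int) (x : Int) : Prop := ∃ i ≤ S.length, x = (S.drop i).sum

theorem sum_take_add_sum_drop' (S : List Int) (i : Nat) :
    (S.take i).sum + (S.drop i).sum = S.sum := by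
  rw [← List.sum_append, List.take_append_drop]

theorem memA_gen (S : List Int) (s : Int) (st : PySem.Set Int) (x : Int) :
    x ∈ (S.foldl (fun p i => (p.1 - i, PySem.Set.add p.2 (p.1 - i))) (s, st)).2 ↔
      x ∈ st ∨ ∃ i, 1 ≤ i ∧ i ≤ S.length ∧ x = s - (S.take i).sum := by
  induction S generalizing s st with
  | nil => simp
  | cons a l ih =>
    simp only [List.foldl_cons]
    rw [ih]
    constructor
    · rintro (h | ⟨i, h1, h2, rfl⟩)
      · rw [PySem.Set.mem_add] at h
        rcases h with h | rfl
        · exact Or.inl h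
        · exact Or.inr ⟨1, le_refl _, by simp, by simp⟩
      · refine Or.inr ⟨i + 1, by omega, by simp; omega, ?_⟩
        simp [List.take_succ_cons]
        ring
    · rintro (h | ⟨i, h1, h2, rfl⟩)
      · exact Or.inl (by rw [PySem.Set.mem_add]; exact Or.inl h)
      · match i, h1 with
        | 1, _ =>
          left; rw [PySem.Set.mem_add]; right; simp
        | (j+2), _ =>
          right
          refine ⟨j + 1, by omega, by simp at h2 ⊢; omega, ?_⟩
          simp [List.take_succ_cons]
          ring

theorem mem_pvShrink (S : List Int) (x : Int) : x ∈ (pvShrink S).2 ↔ SufMem S x := by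
  unfold pvShrink SufMem
  rw [memA_gen]
  have hmem : x ∈ PySem.Set.add PySem.Set.empty S.sum ↔ x = S.sum := by
    rw [PySem.Set.mem_add]; simp [PySem.Set.empty]
  rw [hmem]
  constructor
  · rintro (rfl | ⟨i, h1, h2, rfl⟩)
    · exact ⟨0, by omega, by simp⟩
    · refine ⟨i, h2, ?_⟩
      have := sum_take_add_sum_drop' S i
      omega
  · rintro ⟨i, hi, rfl⟩
    by_cases h0 : i = 0
    · subst h0; left; simp
    · right
      refine ⟨i, by omega, hi, ?_⟩
      have := sum_take_add_sum_drop' S i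
      omega

theorem memB_gen (L : List Int) (t : Int) (acc : List Int) (x : Int) :
    x ∈ (L.foldl (fun p x => (p.1 + x, p.2 ++ [p.1 + x])) (t, acc)).2 ↔
      x ∈ acc ∨ ∃ i, 1 ≤ i ∧ i ≤ L.length ∧ x = t + (L.take i).sum := by
  induction L generalizing t acc with
  | nil => simp
  | cons a l ih =>
    simp only [List.foldl_cons]
    rw [ih]
    constructor
    · rintro (h | ⟨i, h1, h2, rfl⟩)
      · rw [List.mem_append] at h
        rcases h with h | h
        · exact Or.inl h
        · simp at h
          exact Or.inr ⟨1, le_refl _, by simp, by simp [h]⟩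
      · refine Or.inr ⟨i + 1, by omega, by simp; omega, ?_⟩
        simp [List.take_succ_cons]
        ring
    · rintro (h | ⟨i, h1, h2, rfl⟩)
      · exact Or.inl (by rw [List.mem_append]; exact Or.inl h)
      · match i, h1 with
        | 1, _ =>
          left; rw [List.mem_append]; right; simp
        | (j+2), _ =>
          right
          refine ⟨j + 1, by omega, by simp at h2 ⊢; omega, ?_⟩
          simp [List.take_succ_cons]
          ring

theorem revtake_sum (S : List Int) (i : Nat) (h : i ≤ S.length) :
    (S.reverse.take i).sum = (S.drop (S.length - i)).sum := by
  have h2 : (S.reverse.take i).sum + (S.reverse.drop i).sum = S.sum := by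
    rw [← List.sum_append, List.take_append_drop, List.sum_reverse]
  have h3 : S.reverse.drop i = (S.take (S.length - i)).reverse := by
    rw [List.reverse_take]
    congr 1
    omega
  rw [h3, List.sum_reverse] at h2
  have h4 := sum_take_add_sum_drop' S (S.length - i)
  omega

theorem mem_pvSumsDesc (S : List Int) (x : Int) : x ∈ pvSumsDesc S ↔ SufMem S x := by
  unfold pvSumsDesc SufMem
  rw [PySem.List.mem_sorted, memB_gen]
  constructor
  · rintro (h | ⟨i, h1, h2, rfl⟩)
    · simp at h
      exact ⟨S.length, le_refl _, by simp [h]⟩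
    · rw [List.length_reverse] at h2
      refine ⟨S.length - i, by omega, ?_⟩
      rw [revtake_sum S i h2]
      omega
  · rintro ⟨j, hj, rfl⟩
    by_cases hl : j = S.length
    · subst hl; left; simp
    · right
      refine ⟨S.length - j, by omega, by rw [List.length_reverse]; omega, ?_⟩
      rw [revtake_sum S (S.length - j) (by omega)]
      have he : S.length - (S.length - j) = j := by omega
      rw [he]
      omega

theorem pairwise_pvSumsDesc (S : List Int) : (pvSumsDesc S).Pairwise (fun x y => y ≤ x) :=
  PySem.List.sorted_pairwise_rev _ _

theorem head_max_of_pairwise {a : Int} {as : List Int} (h : (a :: as).Pairwise (fun x y => y ≤ x))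
    {v : Int} (hv : v ∈ a :: as) : v ≤ a := by
  rcases List.mem_cons.mp hv with rfl | hv
  · exact le_refl _
  · exact List.rel_of_pairwise_cons h hv

theorem merge3_go_spec (f : Nat) (A B C : List Int)
    (hf : A.length + B.length + C.length < f)
    (hA : A.Pairwise (fun x y => y ≤ x)) (hB : B.Pairwise (fun x y => y ≤ x))
    (hC : C.Pairwise (fun x y => y ≤ x))
    (hex : ∃ v, v ∈ A ∧ v ∈ B ∧ v ∈ C) :
    pvMerge3Go f A B C ∈ A ∧ pvMerge3Go f A B C ∈ B ∧ pvMerge3Go f A B C ∈ C ∧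
      ∀ v, v ∈ A → v ∈ B → v ∈ C → v ≤ pvMerge3Go f A B C := by
  induction f generalizing A B C with
  | zero => omega
  | succ f ih =>
    match A, B, C with
    | [], _, _ => exact absurd hex.choose_spec.1 List.not_mem_nil
    | _ :: _, [], _ => exact absurd hex.choose_spec.2.1 List.not_mem_nil
    | _ :: _, _ :: _, [] => exact absurd hex.choose_spec.2.2 List.not_mem_nil
    | a :: as, b :: bs, c :: cs =>
      by_cases hne : a = b ∧ b = c
      · obtain ⟨rfl, rfl⟩ := hne
        simp only [pvMerge3Go, and_self, ite_true]
        exact ⟨List.mem_cons_self, List.mem_cons_self, List.mem_cons_self,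
          fun v hv _ _ => head_max_of_pairwise hA hv⟩
      · simp only [pvMerge3Go, if_neg hne]
        -- common values are < max a (max b c), so they survive the pointer advance
        have hcom : ∀ v, v ∈ a :: as → v ∈ b :: bs → v ∈ c :: cs →
            v ∈ (if a = max a (max b c) then as else a :: as) ∧
            v ∈ (if b = max a (max b c) then bs else b :: bs) ∧
            v ∈ (if c = max a (max b c) then cs else c :: cs) := by
          intro v hva hvb hvc
          have h1 : v ≤ a := head_max_of_pairwise hA hva
          have h2 : v ≤ b := head_max_of_pairwise hB hvb
          have h3 : v ≤ c := head_max_of_pairwise hC hvc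
          have hlt : v < max a (max b c) := by
            rcases eq_or_lt_of_le (le_trans h1 (le_max_left a (max b c))) with h | h
            · exfalso; apply hne; omega
            · exact h
          refine ⟨?_, ?_, ?_⟩
          · split_ifs with h
            · rcases List.mem_cons.mp hva with rfl | hva'
              · omega
              · exact hva'
            · exact hva
          · split_ifs with h
            · rcases List.mem_cons.mp hvb with rfl | hvb'
              · omega
              · exact hvb'
            · exact hvb
          · split_ifs with h
            · rcases List.mem_cons.mp hvc with rfl | hvc'
              · omega
              · exact hvc'
            · exact hvc
        have hA' : (if a = max a (max b c) then as else a :: as).Pairwise (fun x y => y ≤ x) := by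
          split_ifs
          · exact hA.of_cons
          · exact hA
        have hB' : (if b = max a (max b c) then bs else b :: bs).Pairwise (fun x y => y ≤ x) := by
          split_ifs
          · exact hB.of_cons
          · exact hB
        have hC' : (if c = max a (max b c) then cs else c :: cs).Pairwise (fun x y => y ≤ x) := by
          split_ifs
          · exact hC.of_cons
          · exact hC
        have hex' : ∃ v, v ∈ (if a = max a (max b c) then as else a :: as) ∧
            v ∈ (if b = max a (max b c) then bs else b :: bs) ∧
            v ∈ (if c = max a (max b c) then cs else c :: cs) := by
          obtain ⟨v, hv1, hv2, hv3⟩ := hex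
          exact ⟨v, hcom v hv1 hv2 hv3⟩
        have hadv : a = max a (max b c) ∨ b = max a (max b c) ∨ c = max a (max b c) := by omega
        have hf' : (if a = max a (max b c) then as else a :: as).length +
            (if b = max a (max b c) then bs else b :: bs).length +
            (if c = max a (max b c) then cs else c :: cs).length < f := by
          split_ifs <;> simp only [List.length_cons] at hf ⊢ <;> omega
        obtain ⟨m1, m2, m3, hmax⟩ := ih _ _ _ hf' hA' hB' hC' hex'
        have hsub : ∀ (x : Int) (h : Int) (t : List Int),
            x ∈ (if h = max a (max b c) then t else h :: t) → x ∈ h :: t := by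
          intro x h t hx
          split_ifs at hx
          · exact List.mem_cons_of_mem _ hx
          · exact hx
        exact ⟨hsub _ a as m1, hsub _ b bs m2, hsub _ c cs m3,
          fun v hv1 hv2 hv3 => by
            obtain ⟨h1, h2, h3⟩ := hcom v hv1 hv2 hv3
            exact hmax v h1 h2 h3⟩

theorem merge3_spec (A B C : List Int)
    (hA : A.Pairwise (fun x y => y ≤ x)) (hB : B.Pairwise (fun x y => y ≤ x))
    (hC : C.Pairwise (fun x y => y ≤ x))
    (hex : ∃ v, v ∈ A ∧ v ∈ B ∧ v ∈ C) :
    pvMerge3 A B C ∈ A ∧ pvMerge3 A B C ∈ B ∧ pvMerge3 A B C ∈ C ∧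
      ∀ v, v ∈ A → v ∈ B → v ∈ C → v ≤ pvMerge3 A B C :=
  merge3_go_spec _ A B C (by omega) hA hB hC hex

theorem sufMem_zero (S : List Int) : SufMem S 0 :=
  ⟨S.length, le_refl _, by simp⟩

-- ===== VERDICT (by name: the statement is the Claim_ definition above) =====
theorem maxEqualSum_spec : Claim_equal_maxEqualSum := by
  intro N1 N2 N3 S1 S2 S3 _
  unfold Spec_maxEqualSum maxEqualSum maxEqualSum_alt
  set I := PySem.Set.inter (PySem.Set.inter (pvShrink S1).2 (pvShrink S2).2) (pvShrink S3).2 with hI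
  have hMemI : ∀ y, y ∈ I ↔ SufMem S1 y ∧ SufMem S2 y ∧ SufMem S3 y := by
    intro y
    rw [hI, PySem.Set.mem_inter, PySem.Set.mem_inter, mem_pvShrink, mem_pvShrink, mem_pvShrink]
    tauto
  have h0I : (0 : Int) ∈ I := (hMemI 0).mpr ⟨sufMem_zero S1, sufMem_zero S2, sufMem_zero S3⟩
  obtain ⟨r1, r2, r3, hrmaxL⟩ := merge3_spec (pvSumsDesc S1) (pvSumsDesc S2) (pvSumsDesc S3)
    (pairwise_pvSumsDesc S1) (pairwise_pvSumsDesc S2) (pairwise_pvSumsDesc S3)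
    ⟨0, (mem_pvSumsDesc S1 0).mpr (sufMem_zero S1),
        (mem_pvSumsDesc S2 0).mpr (sufMem_zero S2),
        (mem_pvSumsDesc S3 0).mpr (sufMem_zero S3)⟩
  set r := pvMerge3 (pvSumsDesc S1) (pvSumsDesc S2) (pvSumsDesc S3) with hr
  have hrI : r ∈ I := (hMemI r).mpr
    ⟨(mem_pvSumsDesc S1 r).mp r1, (mem_pvSumsDesc S2 r).mp r2, (mem_pvSumsDesc S3 r).mp r3⟩
  have hrmax : ∀ y ∈ I, y ≤ r := by
    intro y hy
    obtain ⟨h1, h2, h3⟩ := (hMemI y).mp hy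
    exact hrmaxL y ((mem_pvSumsDesc S1 y).mpr h1) ((mem_pvSumsDesc S2 y).mpr h2)
      ((mem_pvSumsDesc S3 y).mpr h3)
  cases hd : PySem.List.sorted I (fun x => x) true with
  | nil =>
    exfalso
    rw [PySem.List.sorted_eq_nil_iff] at hd
    rw [hd] at h0I
    exact List.not_mem_nil h0I
  | cons m tl =>
    have hmI : m ∈ I := by
      have : m ∈ PySem.List.sorted I (fun x => x) true := by rw [hd]; exact List.mem_cons_self
      rwa [PySem.List.mem_sorted] at this
    have hmax : ∀ y ∈ I, y ≤ m := PySem.List.key_head_sorted_rev_ge I (fun x => x) hd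
    have hfin : (match PySem.List.sorted I (fun x => x) true with | [] => (0 : Int) | x :: _ => x) = r := by
      rw [hd]
      exact le_antisymm (hrmax m hmI) (hmax r hrI)
    exact hfin
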